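-- pv_equiv track=rewrite | github.com/pypi-data/pypi-mirror-389 | packages/mystiks/mystiks-1.0.6-py3-none-any.whl/mystiks/findings/__init__.py | check_pronounceable_by_repetition
-- ===== SOURCE A (Python) =====
-- def check_pronounceable_by_repetition(string, max_vowel_repetitions=3, max_consonant_repetitions=4):
--     repeated_vowels = 0
--     repeated_consonants = 0
--
--     for character in string.lower():
--         if character not in 'abcdefghijklmnopqrstuvwxyz':
--             return False
--
--         if character in 'aeiou':
--             repeated_vowels += 1
--             repeated_consonants = 0
--         else:
--             repeated_consonants += 1
--             repeated_vowels = 0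
--
--         if repeated_vowels > max_vowel_repetitions or repeated_consonants > max_consonant_repetitions:
--             return False
--
--     return True
-- ===== SOURCE B (Python) =====
-- def check_pronounceable_by_repetition(string, max_vowel_repetitions=3, max_consonant_repetitions=4):
--     s = string.lower()
--     if not all(c in 'abcdefghijklmnopqrstuvwxyz' for c in s):
--         return False
--     i, n = 0, len(s)
--     while i < n:
--         is_vowel = s[i] in 'aeiou'
--         j = i
--         while j < n and (s[j] in 'aeiou') == is_vowel:
--             j += 1
--         limit = max_vowel_repetitions if is_vowel else max_consonant_repetitions
--         if j - i > limit:
--             return False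
--         i = j
--     return True
-- ===== Notes on version B (the rewrite author's own statement) =====
-- stated objective: idiomatic
-- what changed: B validates the whole string up front with all(...), then scans it run by run (run-length grouping of consecutive vowel/consonant blocks) and compares each run length against its own limit, instead of A's per-character pass with two reset-on-switch counters.
-- intended difference: On nonempty all-letter strings whose characters are all of one kind (all vowels or all consonants) within their own limit while the other kind's limit is negative, A returns False because it compares its reset counter 0 against the negative limit at every step, while B returns True because it applies each limit only to runs of its own kind, which is the intended reading of the limits. — e.g. on check_pronounceable_by_repetition("bcd", -1, 3): A returns false, B returns true
import Mathlib
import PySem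

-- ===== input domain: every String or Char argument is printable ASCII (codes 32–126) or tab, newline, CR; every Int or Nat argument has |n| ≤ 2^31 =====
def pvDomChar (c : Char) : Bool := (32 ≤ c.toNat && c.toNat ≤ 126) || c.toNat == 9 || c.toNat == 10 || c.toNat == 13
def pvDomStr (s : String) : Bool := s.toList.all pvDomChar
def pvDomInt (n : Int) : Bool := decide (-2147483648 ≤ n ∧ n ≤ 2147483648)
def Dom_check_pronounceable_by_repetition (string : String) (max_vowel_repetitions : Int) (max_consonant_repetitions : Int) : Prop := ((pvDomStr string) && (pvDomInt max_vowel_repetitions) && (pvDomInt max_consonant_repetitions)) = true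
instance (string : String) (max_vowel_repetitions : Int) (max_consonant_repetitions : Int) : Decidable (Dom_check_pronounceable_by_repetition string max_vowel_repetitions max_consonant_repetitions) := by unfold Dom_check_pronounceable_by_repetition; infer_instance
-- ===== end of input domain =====

-- B replaces A's per-character scan with two reset-on-switch counters by an upfront all-letters
-- validation followed by a run-by-run scan (run-length grouping of consecutive vowel/consonant
-- blocks), each run length compared with its own limit (objective: idiomatic, same O(n) cost).

-- ===== PORT A =====
def pvLetters : List Char := "abcdefghijklmnopqrstuvwxyz".toList
def pvVowels : List Char := "aeiou".toList

def goA (mv mc : Int) : List Char → Int → Int → Bool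
  | [], _, _ => true
  | c :: rest, rv, rc =>
    if !(pvLetters.contains c) then false
    else
      let rv' : Int := if pvVowels.contains c then rv + 1 else 0
      let rc' : Int := if pvVowels.contains c then 0 else rc + 1
      if rv' > mv || rc' > mc then false
      else goA mv mc rest rv' rc'

def check_pronounceable_by_repetition (string : String) (max_vowel_repetitions : Int) (max_consonant_repetitions : Int) : Bool :=
  goA max_vowel_repetitions max_consonant_repetitions (PySem.Str.lower string).toList 0 0

-- ===== PORT B =====
-- run-by-run scan: the inner `while j < n and …` loop of Source B is the takeWhile of the
-- remainder, the outer `i = j` step is the dropWhile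
def goB (mv mc : Int) : List Char → Bool
  | [] => true
  | c :: rest =>
    if (((c :: rest).takeWhile (fun d => pvVowels.contains d == pvVowels.contains c)).length : Int) > (if pvVowels.contains c then mv else mc) then false
    else goB mv mc ((c :: rest).dropWhile (fun d => pvVowels.contains d == pvVowels.contains c))
  termination_by l => l.length
  decreasing_by
    simp only [List.dropWhile_cons, beq_self_eq_true, if_true]
    exact Nat.lt_succ_of_le (List.length_dropWhile_le _ rest)

def check_pronounceable_by_repetition_alt (string : String) (max_vowel_repetitions : Int) (max_consonant_repetitions : Int) : Bool :=
  let l := (PySem.Str.lower string).toList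
  if l.all (fun c => pvLetters.contains c) then goB max_vowel_repetitions max_consonant_repetitions l
  else false

-- ===== PRECONDITION & SPEC =====
-- On nonempty all-letter strings whose characters are all of one kind (all vowels or all
-- consonants) within their own limit while the other kind's limit is negative, A returns False
-- because it compares its reset counter 0 against the negative limit at every step, while B
-- returns True because it applies each limit only to runs of its own kind, which is the
-- intended reading of the limits.
def D_check_pronounceable_by_repetition (string : String) (max_vowel_repetitions : Int) (max_consonant_repetitions : Int) : Prop :=
  string ≠ "" ∧
  min max_vowel_repetitions max_consonant_repetitions < 0 ∧
  PySem.Str.len string ≤ max max_vowel_repetitions max_consonant_repetitions ∧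
  (PySem.Str.lower string).toList.all (fun c => pvLetters.contains c && (pvVowels.contains c == decide (max_consonant_repetitions < max_vowel_repetitions))) = true
instance (string : String) (max_vowel_repetitions : Int) (max_consonant_repetitions : Int) : Decidable (D_check_pronounceable_by_repetition string max_vowel_repetitions max_consonant_repetitions) := by unfold D_check_pronounceable_by_repetition; infer_instance

def Spec_check_pronounceable_by_repetition (string : String) (max_vowel_repetitions : Int) (max_consonant_repetitions : Int) (out : Bool) : Prop := ¬ D_check_pronounceable_by_repetition string max_vowel_repetitions max_consonant_repetitions → out = check_pronounceable_by_repetition_alt string max_vowel_repetitions max_consonant_repetitions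
instance (string : String) (max_vowel_repetitions : Int) (max_consonant_repetitions : Int) (out : Bool) : Decidable (Spec_check_pronounceable_by_repetition string max_vowel_repetitions max_consonant_repetitions out) := by unfold Spec_check_pronounceable_by_repetition; infer_instance

def pvDiffWitness_check_pronounceable_by_repetition : String × Int × Int := ("bcd", -1, 3)
def pvDiffWitnessOut_check_pronounceable_by_repetition : Bool × Bool := (false, true)

-- ===== CLAIM (what is proved, stated in full; the proofs are below) =====
def Claim_unchanged_check_pronounceable_by_repetition : Prop := ∀ (string : String) (max_vowel_repetitions : Int) (max_consonant_repetitions : Int), Dom_check_pronounceable_by_repetition string max_vowel_repetitions max_consonant_repetitions → Spec_check_pronounceable_by_repetition string max_vowel_repetitions max_consonant_repetitions (check_pronounceable_by_repetition string max_vowel_repetitions max_consonant_repetitions)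
def Claim_changed_check_pronounceable_by_repetition : Prop := Dom_check_pronounceable_by_repetition (pvDiffWitness_check_pronounceable_by_repetition.1) (pvDiffWitness_check_pronounceable_by_repetition.2.1) (pvDiffWitness_check_pronounceable_by_repetition.2.2) ∧ D_check_pronounceable_by_repetition (pvDiffWitness_check_pronounceable_by_repetition.1) (pvDiffWitness_check_pronounceable_by_repetition.2.1) (pvDiffWitness_check_pronounceable_by_repetition.2.2) ∧ check_pronounceable_by_repetition (pvDiffWitness_check_pronounceable_by_repetition.1) (pvDiffWitness_check_pronounceable_by_repetition.2.1) (pvDiffWitness_check_pronounceable_by_repetition.2.2) = pvDiffWitnessOut_check_pronounceable_by_repetition.1 ∧ check_pronounceable_by_repetition_alt (pvDiffWitness_check_pronounceable_by_repetition.1) (pvDiffWitness_check_pronounceable_by_repetition.2.1) (pvDiffWitness_check_pronounceable_by_repetition.2.2) = pvDiffWitnessOut_check_pronounceable_by_repetition.2 ∧ pvDiffWitnessOut_check_pronounceable_by_repetition.1 ≠ pvDiffWitnessOut_check_pronounceable_by_repetition.2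
def Claim_exact_check_pronounceable_by_repetition : Prop := ∀ (string : String) (max_vowel_repetitions : Int) (max_consonant_repetitions : Int), Dom_check_pronounceable_by_repetition string max_vowel_repetitions max_consonant_repetitions → D_check_pronounceable_by_repetition string max_vowel_repetitions max_consonant_repetitions → check_pronounceable_by_repetition string max_vowel_repetitions max_consonant_repetitions ≠ check_pronounceable_by_repetition_alt string max_vowel_repetitions max_consonant_repetitions

-- ===== LEMMAS AND PROOFS =====

theorem goA_false_nonletter (mv mc : Int) (l : List Char) (rv rc : Int)
    (h : l.all (fun c => pvLetters.contains c) ≠ true) : goA mv mc l rv rc = false := by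
  induction l generalizing rv rc with
  | nil => simp at h
  | cons c rest ih =>
    by_cases hc : pvLetters.contains c = true
    · have hrest : rest.all (fun c => pvLetters.contains c) ≠ true := by
        intro hb; exact h (by simp only [List.all_cons, hc, hb, Bool.and_self])
      rw [goA]
      simp only [hc, Bool.not_true, Bool.false_eq_true, if_false]
      split <;> (split <;> first | rfl | exact ih _ _ hrest)
    · have hcf : pvLetters.contains c = false := by simpa using hc
      rw [goA, hcf]
      rfl

theorem goA_false_neg (mv mc : Int) (h : mv < 0 ∨ mc < 0) (c : Char) (rest : List Char)
    (hc : pvLetters.contains c = true) : goA mv mc (c :: rest) 0 0 = false := by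
  rw [goA]
  simp only [hc, Bool.not_true, Bool.false_eq_true, if_false]
  by_cases hv : pvVowels.contains c = true
  · simp only [hv, if_true]
    have : (decide ((0:Int) + 1 > mv) || decide ((0:Int) > mc)) = true := by
      rcases h with h | h <;> simp <;> omega
    simp only [this, if_true]
  · have hvf : pvVowels.contains c = false := by simpa using hv
    simp only [hvf, Bool.false_eq_true, if_false]
    have : (decide ((0:Int) > mv) || decide ((0:Int) + 1 > mc)) = true := by
      rcases h with h | h <;> simp <;> omega
    simp only [this, if_true]

theorem goA_fresh (mv mc : Int) (c : Char) (rest : List Char) (t : Bool) (k : Int)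
    (h : pvVowels.contains c ≠ t) :
    goA mv mc (c :: rest) (if t then k else 0) (if t then 0 else k) = goA mv mc (c :: rest) 0 0 := by
  rw [goA, goA]
  cases t with
  | false =>
    have hm : c ∈ pvVowels := by
      have : pvVowels.contains c = true := by cases hcv : pvVowels.contains c <;> simp_all
      simpa using this
    simp [hm]
  | true =>
    have hm : c ∉ pvVowels := by
      have : pvVowels.contains c = false := by cases hcv : pvVowels.contains c <;> simp_all
      simpa using this
    simp [hm]

theorem goA_run (mv mc : Int) (hmv : 0 ≤ mv) (hmc : 0 ≤ mc) (t : Bool) (run : List Char) :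
    ∀ (k : Int) (rest : List Char), 0 ≤ k → k ≤ (if t then mv else mc) →
    (∀ d ∈ run, pvLetters.contains d = true ∧ pvVowels.contains d = t) →
    goA mv mc (run ++ rest) (if t then k else 0) (if t then 0 else k) =
      if (k + run.length : Int) ≤ (if t then mv else mc) then
        goA mv mc rest (if t then k + run.length else 0) (if t then 0 else k + run.length)
      else false := by
  induction run with
  | nil =>
    intro k rest hk0 hk hall
    simp only [List.nil_append, List.length_nil, Nat.cast_zero, add_zero]
    rw [if_pos hk]
  | cons c run' ih =>
    intro k rest hk0 hk hall
    obtain ⟨hcl, hcv⟩ := hall c (by simp)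
    have hall' : ∀ d ∈ run', pvLetters.contains d = true ∧ pvVowels.contains d = t :=
      fun d hd => hall d (by simp [hd])
    have harith : k + ((run'.length : Int) + 1) = (k + 1) + run'.length := by ring
    rw [List.cons_append, goA]
    simp only [hcl, Bool.not_true, Bool.false_eq_true, if_false, hcv, List.length_cons,
      Nat.cast_add, Nat.cast_one, harith]
    cases t with
    | true =>
      simp only [if_true]
      by_cases hlim : k + 1 ≤ mv
      · have hcond : (decide (k + 1 > mv) || decide ((0:Int) > mc)) = false := by
          simp; omega
        simp only [hcond, Bool.false_eq_true, if_false]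
        have := ih (k + 1) rest (by omega) (by simpa using hlim) hall'
        simpa using this
      · have hcond : (decide (k + 1 > mv) || decide ((0:Int) > mc)) = true := by
          simp; omega
        simp only [hcond, if_true]
        rw [if_neg (by have : (0:Int) ≤ run'.length := Int.natCast_nonneg _; omega)]
    | false =>
      simp only [Bool.false_eq_true, if_false]
      by_cases hlim : k + 1 ≤ mc
      · have hcond : (decide ((0:Int) > mv) || decide (k + 1 > mc)) = false := by
          simp; omega
        simp only [hcond, Bool.false_eq_true, if_false]
        have := ih (k + 1) rest (by omega) (by simpa using hlim) hall'
        simpa using this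
      · have hcond : (decide ((0:Int) > mv) || decide (k + 1 > mc)) = true := by
          simp; omega
        simp only [hcond, if_true]
        rw [if_neg (by have : (0:Int) ≤ run'.length := Int.natCast_nonneg _; omega)]

theorem goA_eq_goB (mv mc : Int) (hmv : 0 ≤ mv) (hmc : 0 ≤ mc) :
    ∀ (n : Nat) (l : List Char), l.length ≤ n → l.all (fun c => pvLetters.contains c) = true →
    goA mv mc l 0 0 = goB mv mc l := by
  intro n
  induction n with
  | zero =>
    intro l hlen _
    have : l = [] := List.eq_nil_of_length_eq_zero (Nat.le_zero.mp hlen)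
    subst this
    simp [goA, goB]
  | succ n ih =>
    intro l hlen hall
    match l with
    | [] => simp [goA, goB]
    | c :: rest =>
      have hpc : (fun d => pvVowels.contains d == pvVowels.contains c) c = true := beq_self_eq_true _
      have hsplit : (c :: rest).takeWhile (fun d => pvVowels.contains d == pvVowels.contains c) ++
          (c :: rest).dropWhile (fun d => pvVowels.contains d == pvVowels.contains c) = c :: rest :=
        List.takeWhile_append_dropWhile
      have hallrun : ∀ d ∈ (c :: rest).takeWhile (fun d => pvVowels.contains d == pvVowels.contains c),
          pvLetters.contains d = true ∧ pvVowels.contains d = pvVowels.contains c := by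
        intro d hd
        refine ⟨?_, ?_⟩
        · have : d ∈ c :: rest := List.takeWhile_subset _ hd
          exact (List.all_eq_true.mp hall) d this
        · exact beq_iff_eq.mp (by simpa using List.mem_takeWhile_imp hd)
      have hlim0 : (0:Int) ≤ (if pvVowels.contains c then mv else mc) := by
        cases pvVowels.contains c <;> simpa
      have h0 := goA_run mv mc hmv hmc (pvVowels.contains c)
        ((c :: rest).takeWhile (fun d => pvVowels.contains d == pvVowels.contains c)) 0
        ((c :: rest).dropWhile (fun d => pvVowels.contains d == pvVowels.contains c))
        le_rfl hlim0 hallrun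
      rw [hsplit] at h0
      simp only [ite_self, zero_add] at h0
      rw [h0, goB]
      by_cases hlen2 : (((c :: rest).takeWhile (fun d => pvVowels.contains d == pvVowels.contains c)).length : Int) ≤ (if pvVowels.contains c then mv else mc)
      · have hngt : ¬ ((((c :: rest).takeWhile (fun d => pvVowels.contains d == pvVowels.contains c)).length : Int) > (if pvVowels.contains c then mv else mc)) := by omega
        rw [if_pos hlen2, if_neg hngt]
        have hrest' : (c :: rest).dropWhile (fun d => pvVowels.contains d == pvVowels.contains c) = rest.dropWhile (fun d => pvVowels.contains d == pvVowels.contains c) :=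
          List.dropWhile_cons_of_pos hpc
        cases hdw : (c :: rest).dropWhile (fun d => pvVowels.contains d == pvVowels.contains c) with
        | nil =>
          simp [goA, goB]
        | cons c' rest'' =>
          have hne : (c :: rest).dropWhile (fun d => pvVowels.contains d == pvVowels.contains c) ≠ [] := by
            rw [hdw]; exact List.cons_ne_nil _ _
          have hv' : pvVowels.contains c' ≠ pvVowels.contains c := by
            have h1 := List.head_dropWhile_not (fun d => pvVowels.contains d == pvVowels.contains c) hne
            have h4 : ((c :: rest).dropWhile (fun d => pvVowels.contains d == pvVowels.contains c)).head? = some c' := by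
              rw [hdw]; rfl
            rw [List.head?_eq_some_head hne] at h4
            rw [Option.some.injEq] at h4
            rw [h4] at h1
            exact beq_eq_false_iff_ne.mp (by simpa using h1)
          rw [goA_fresh mv mc c' rest'' (pvVowels.contains c) _ hv']
          refine ih (c' :: rest'') ?_ ?_
          · have h1 : (c' :: rest'').length ≤ rest.length := by
              rw [← hdw, hrest']
              exact List.length_dropWhile_le _ _
            simpa using Nat.le_trans h1 (by simpa using hlen)
          · refine List.all_eq_true.mpr ?_
            intro d hd
            have : d ∈ c :: rest := List.dropWhile_subset _ (hdw ▸ hd)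
            exact (List.all_eq_true.mp hall) d this
      · have hgt : ((((c :: rest).takeWhile (fun d => pvVowels.contains d == pvVowels.contains c)).length : Int) > (if pvVowels.contains c then mv else mc)) := by omega
        rw [if_neg hlen2, if_pos hgt]

theorem goB_false_bad (mv mc : Int) (t : Bool) (hbad : (if t then mv else mc) < 0) :
    ∀ (n : Nat) (l : List Char), l.length ≤ n → (∃ d ∈ l, pvVowels.contains d = t) →
    goB mv mc l = false := by
  intro n
  induction n with
  | zero =>
    intro l hlen hex
    have : l = [] := List.eq_nil_of_length_eq_zero (Nat.le_zero.mp hlen)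
    subst this
    simp at hex
  | succ n ih =>
    intro l hlen hex
    match l with
    | [] => simp at hex
    | c :: rest =>
      have hpc : (fun d => pvVowels.contains d == pvVowels.contains c) c = true := beq_self_eq_true _
      rw [goB]
      by_cases hct : pvVowels.contains c = t
      · have hrun : (c :: rest).takeWhile (fun d => pvVowels.contains d == pvVowels.contains c) =
            c :: rest.takeWhile (fun d => pvVowels.contains d == pvVowels.contains c) :=
          List.takeWhile_cons_of_pos hpc
        have hpos : (((c :: rest).takeWhile (fun d => pvVowels.contains d == pvVowels.contains c)).length : Int) > (if pvVowels.contains c then mv else mc) := by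
          rw [hrun, hct]
          have : (0:Int) ≤ (rest.takeWhile (fun d => pvVowels.contains d == pvVowels.contains c)).length := Int.natCast_nonneg _
          simp only [List.length_cons]
          push_cast
          omega
        rw [if_pos hpos]
      · by_cases hc2 : (((c :: rest).takeWhile (fun d => pvVowels.contains d == pvVowels.contains c)).length : Int) > (if pvVowels.contains c then mv else mc)
        · rw [if_pos hc2]
        · rw [if_neg hc2]
          obtain ⟨d, hd, hdt⟩ := hex
          have hsplit : (c :: rest).takeWhile (fun d => pvVowels.contains d == pvVowels.contains c) ++
              (c :: rest).dropWhile (fun d => pvVowels.contains d == pvVowels.contains c) = c :: rest :=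
            List.takeWhile_append_dropWhile
          have hdrest : d ∈ (c :: rest).dropWhile (fun d => pvVowels.contains d == pvVowels.contains c) := by
            rcases List.mem_append.mp (by rw [hsplit]; exact hd) with h | h
            · exfalso
              have := List.mem_takeWhile_imp h
              have hvd : pvVowels.contains d = pvVowels.contains c := beq_iff_eq.mp (by simpa using this)
              exact hct (hvd ▸ hdt)
            · exact h
          refine ih _ ?_ ⟨d, hdrest, hdt⟩
          have hrest' : (c :: rest).dropWhile (fun d => pvVowels.contains d == pvVowels.contains c) = rest.dropWhile (fun d => pvVowels.contains d == pvVowels.contains c) :=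
            List.dropWhile_cons_of_pos hpc
          rw [hrest']
          have h1 := List.length_dropWhile_le (fun d => pvVowels.contains d == pvVowels.contains c) rest
          simp only [List.length_cons] at hlen
          omega

theorem goB_over (mv mc : Int) (t : Bool) (c : Char) (rest : List Char)
    (hall : ∀ d ∈ c :: rest, pvVowels.contains d = t)
    (h : (if t then mv else mc) < ((c :: rest).length : Int)) :
    goB mv mc (c :: rest) = false := by
  have hct : pvVowels.contains c = t := hall c (by simp)
  have hrun : (c :: rest).takeWhile (fun d => pvVowels.contains d == pvVowels.contains c) = c :: rest :=
    List.takeWhile_eq_self_iff.mpr (fun x hx => by rw [hall x hx, hct]; exact beq_self_eq_true _)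
  rw [goB, hrun]
  rw [if_pos (by rw [hct]; omega)]

theorem goB_true_allsame (mv mc : Int) (t : Bool) (l : List Char)
    (hall : ∀ d ∈ l, pvVowels.contains d = t)
    (h : ((l.length : Int)) ≤ (if t then mv else mc)) :
    goB mv mc l = true := by
  match l with
  | [] => simp [goB]
  | c :: rest =>
    have hct : pvVowels.contains c = t := hall c (by simp)
    have hrun : (c :: rest).takeWhile (fun d => pvVowels.contains d == pvVowels.contains c) = c :: rest :=
      List.takeWhile_eq_self_iff.mpr (fun x hx => by rw [hall x hx, hct]; exact beq_self_eq_true _)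
    have hdrop : (c :: rest).dropWhile (fun d => pvVowels.contains d == pvVowels.contains c) = [] :=
      List.dropWhile_eq_nil_iff.mpr (fun x hx => by rw [hall x hx, hct]; exact beq_self_eq_true _)
    rw [goB, hrun, hdrop]
    rw [if_neg (by rw [hct]; omega)]
    simp [goB]


theorem pron_unchanged_aux (mv mc : Int) (L : List Char)
    (hnD : ¬ (L ≠ [] ∧ min mv mc < 0 ∧ ((L.length : Int)) ≤ max mv mc ∧
      L.all (fun c => pvLetters.contains c && (pvVowels.contains c == decide (mc < mv))) = true)) :
    goA mv mc L 0 0 = (if L.all (fun c => pvLetters.contains c) then goB mv mc L else false) := by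
  by_cases hall : L.all (fun c => pvLetters.contains c) = true
  · rw [if_pos hall]
    match L, hnD, hall with
    | [], _, _ => simp [goA, goB]
    | c :: rest, hnD, hall =>
      have hletc : pvLetters.contains c = true := (List.all_eq_true.mp hall) c (by simp)
      by_cases hmv : 0 ≤ mv
      · by_cases hmc : 0 ≤ mc
        · exact goA_eq_goB mv mc hmv hmc (c :: rest).length (c :: rest) le_rfl hall
        · have hmc' : mc < 0 := by omega
          rw [goA_false_neg mv mc (Or.inr hmc') c rest hletc]
          by_cases hav : (c :: rest).all (fun c => pvVowels.contains c) = true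
          · have hlen : mv < ((c :: rest).length : Int) := by
              by_contra hle
              push_neg at hle
              refine hnD ⟨List.cons_ne_nil _ _, by omega, by omega, ?_⟩
              refine List.all_eq_true.mpr (fun d hd => ?_)
              have h1 := (List.all_eq_true.mp hall) d hd
              have h2 := (List.all_eq_true.mp hav) d hd
              have hdec : decide (mc < mv) = true := by simp only [decide_eq_true_eq]; omega
              simp only [h1, h2, hdec]
              rfl
            exact (goB_over mv mc true c rest (fun d hd => (List.all_eq_true.mp hav) d hd) (by simpa using hlen)).symm
          · have hex : ∃ d ∈ c :: rest, pvVowels.contains d = false := by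
              by_contra hno
              push_neg at hno
              exact hav (List.all_eq_true.mpr (fun d hd => by
                cases hdv : pvVowels.contains d with
                | true => rfl
                | false => exact absurd hdv (hno d hd)))
            exact (goB_false_bad mv mc false (by simpa) (c :: rest).length (c :: rest) le_rfl hex).symm
      · have hmv' : mv < 0 := by omega
        rw [goA_false_neg mv mc (Or.inl hmv') c rest hletc]
        by_cases hmc : 0 ≤ mc
        · by_cases hac : (c :: rest).all (fun c => !pvVowels.contains c) = true
          · have hlen : mc < ((c :: rest).length : Int) := by
              by_contra hle
              push_neg at hle
              refine hnD ⟨List.cons_ne_nil _ _, by omega, by omega, ?_⟩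
              refine List.all_eq_true.mpr (fun d hd => ?_)
              have h1 := (List.all_eq_true.mp hall) d hd
              have h2 : pvVowels.contains d = false := by
                have := (List.all_eq_true.mp hac) d hd; simpa using this
              have hdec : decide (mc < mv) = false := by simp only [decide_eq_false_iff_not]; omega
              simp only [h1, h2, hdec]
              rfl
            exact (goB_over mv mc false c rest (fun d hd => by
              have := (List.all_eq_true.mp hac) d hd; simpa using this) (by simpa using hlen)).symm
          · have hex : ∃ d ∈ c :: rest, pvVowels.contains d = true := by
              by_contra hno
              push_neg at hno
              exact hac (List.all_eq_true.mpr (fun d hd => by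
                cases hdv : pvVowels.contains d with
                | true => exact absurd hdv (hno d hd)
                | false => rfl))
            exact (goB_false_bad mv mc true (by simpa) (c :: rest).length (c :: rest) le_rfl hex).symm
        · have hmc' : mc < 0 := by omega
          cases hvc : pvVowels.contains c with
          | true => exact (goB_false_bad mv mc true (by simpa) (c :: rest).length (c :: rest) le_rfl ⟨c, by simp, hvc⟩).symm
          | false => exact (goB_false_bad mv mc false (by simpa) (c :: rest).length (c :: rest) le_rfl ⟨c, by simp, hvc⟩).symm
  · rw [if_neg hall]
    exact goA_false_nonletter mv mc L 0 0 hall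

-- ===== VERDICT (by name: the statement is the Claim_ definition above) =====
theorem check_pronounceable_by_repetition_spec : Claim_unchanged_check_pronounceable_by_repetition := by
  intro s mv mc _ hnD
  unfold check_pronounceable_by_repetition check_pronounceable_by_repetition_alt
  refine pron_unchanged_aux mv mc (PySem.Str.lower s).toList ?_
  rintro ⟨h1, h2, h3, h4⟩
  refine hnD ⟨?_, h2, ?_, h4⟩
  · intro hs
    subst hs
    exact h1 (by decide)
  · have hlg : (PySem.Str.lower s).toList.length = s.toList.length := by
      simp [PySem.Str.toList_lower, PySem.Chars.lower]
    rw [PySem.Str.len_eq]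
    rw [hlg] at h3
    exact h3

theorem pron_tight_aux (mv mc : Int) (c : Char) (rest : List Char)
    (hmin : min mv mc < 0)
    (hlen : (((c :: rest).length : Int)) ≤ max mv mc)
    (hall2 : (c :: rest).all (fun c => pvLetters.contains c && (pvVowels.contains c == decide (mc < mv))) = true) :
    goA mv mc (c :: rest) 0 0 ≠ (if (c :: rest).all (fun c => pvLetters.contains c) then goB mv mc (c :: rest) else false) := by
  have hpt : ∀ d ∈ c :: rest, pvLetters.contains d = true ∧ pvVowels.contains d = decide (mc < mv) := by
    intro d hd
    have h1 := (List.all_eq_true.mp hall2) d hd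
    rw [Bool.and_eq_true] at h1
    exact ⟨h1.1, beq_iff_eq.mp h1.2⟩
  have hletter : (c :: rest).all (fun c => pvLetters.contains c) = true :=
    List.all_eq_true.mpr (fun d hd => (hpt d hd).1)
  have hmax : (if decide (mc < mv) then mv else mc) = max mv mc := by
    split_ifs with h
    · rw [decide_eq_true_eq] at h; omega
    · rw [decide_eq_true_eq] at h; omega
  rw [goA_false_neg mv mc (by omega) c rest ((hpt c (by simp)).1)]
  rw [if_pos hletter]
  rw [goB_true_allsame mv mc (decide (mc < mv)) (c :: rest) (fun d hd => (hpt d hd).2) (by rw [hmax]; exact hlen)]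
  simp

set_option maxRecDepth 4000 in
theorem check_pronounceable_by_repetition_changed : Claim_changed_check_pronounceable_by_repetition := by
  unfold Claim_changed_check_pronounceable_by_repetition
  refine ⟨by decide, by decide, by decide, ?_, by decide⟩
  show check_pronounceable_by_repetition_alt "bcd" (-1) 3 = true
  have hL : (PySem.Str.lower "bcd").toList = ['b', 'c', 'd'] := by
    rw [PySem.Str.toList_lower]
    decide
  show (if ((PySem.Str.lower "bcd").toList).all (fun c => pvLetters.contains c) then goB (-1) 3 (PySem.Str.lower "bcd").toList else false) = true
  rw [hL, if_pos (by decide)]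
  exact goB_true_allsame (-1) 3 false ['b', 'c', 'd'] (by intro d hd; fin_cases hd <;> decide) (by decide)

theorem check_pronounceable_by_repetition_tight : Claim_exact_check_pronounceable_by_repetition := by
  intro s mv mc _ hD
  obtain ⟨hs, hmin, hlen, hall2⟩ := hD
  have hlg : (PySem.Str.lower s).toList.length = s.toList.length := by
    simp [PySem.Str.toList_lower, PySem.Chars.lower]
  have hlen' : (((PySem.Str.lower s).toList.length : Int)) ≤ max mv mc := by
    rw [PySem.Str.len_eq] at hlen
    rw [hlg]
    exact hlen
  show goA mv mc (PySem.Str.lower s).toList 0 0 ≠ (if ((PySem.Str.lower s).toList).all (fun c => pvLetters.contains c) then goB mv mc (PySem.Str.lower s).toList else false)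
  cases hL : (PySem.Str.lower s).toList with
  | nil =>
    exfalso
    apply hs
    have hzero : s.toList.length = 0 := by rw [← hlg, hL]; rfl
    have : s.toList = [] := List.eq_nil_of_length_eq_zero hzero
    cases s
    simp_all
  | cons c rest =>
    rw [hL] at hlen' hall2
    exact pron_tight_aux mv mc c rest hmin hlen' hall2
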